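-- pv_equiv track=rewrite | github.com/zamaani2/sis_local_ddocker | shs_system/views/mock_exams.py | sanitize_excel_sheet_name
-- ===== SOURCE A (Python) =====
-- def sanitize_excel_sheet_name(name):
--     """
--     Sanitize a name to be used as an Excel sheet name.
--     Excel sheet names have the following restrictions:
--     - Maximum 31 characters
--     - Cannot contain: [ ] : * ? / \
--     - Cannot start or end with apostrophe
--     - Cannot be empty
--     """
--     if not name:
--         return "Sheet"
--
--     # Remove invalid characters
--     invalid_chars = [":", "\\", "/", "?", "*", "[", "]"]
--     for char in invalid_chars:
--         name = name.replace(char, "_")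
--
--     # Remove leading/trailing apostrophes
--     name = name.strip("'")
--
--     # Limit to 31 characters
--     if len(name) > 31:
--         name = name[:31]
--
--     # Ensure not empty
--     if not name:
--         name = "Sheet"
--
--     return name
-- ===== SOURCE B (Python) =====
-- _INVALID = {":", "\\", "/", "?", "*", "[", "]"}
--
-- def sanitize_excel_sheet_name(name):
--     if not name:
--         return "Sheet"
--     # single pass over the input instead of seven replace() scans
--     name = "".join("_" if c in _INVALID else c for c in name)
--     name = name.strip("'")
--     if len(name) > 31:
--         name = name[:31]
--     return name or "Sheet"
-- ===== Notes on version B (the rewrite author's own statement) =====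
-- stated objective: idiomatic
-- what changed: Replaces the seven sequential str.replace passes over the whole string with one single traversal that maps each invalid character to an underscore via a set-membership test.
import Mathlib
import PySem

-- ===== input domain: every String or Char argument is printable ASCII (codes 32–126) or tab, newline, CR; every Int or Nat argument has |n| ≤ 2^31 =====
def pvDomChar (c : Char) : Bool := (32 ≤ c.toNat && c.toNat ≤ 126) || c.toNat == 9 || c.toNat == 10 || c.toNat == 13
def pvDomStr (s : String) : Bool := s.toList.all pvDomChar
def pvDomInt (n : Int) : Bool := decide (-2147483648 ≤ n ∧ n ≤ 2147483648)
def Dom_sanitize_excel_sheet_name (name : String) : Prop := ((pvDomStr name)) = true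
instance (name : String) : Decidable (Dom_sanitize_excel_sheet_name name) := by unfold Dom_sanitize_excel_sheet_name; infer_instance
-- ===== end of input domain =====

-- B replaces A's seven sequential str.replace passes with one single map over the input's characters; same return value everywhere.

-- ===== PORT A =====
def sanitize_excel_sheet_name (name : String) : String :=
  if name = "" then "Sheet"
  else
    -- invalid_chars = [":", "\\", "/", "?", "*", "[", "]"]; for char in invalid_chars: name = name.replace(char, "_")
    let name1 := [":", "\\", "/", "?", "*", "[", "]"].foldl
      (fun n c => PySem.Str.replace n c "_") name
    -- name = name.strip("'")
    let name2 := PySem.Str.stripChars name1 "'"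
    -- if len(name) > 31: name = name[:31]
    let name3 := if PySem.Str.len name2 > 31 then PySem.Str.slice name2 none (some 31) else name2
    -- if not name: name = "Sheet"
    if name3 = "" then "Sheet" else name3

-- ===== PORT B =====
def pvInvalidChars : List Char := [':', '\\', '/', '?', '*', '[', ']']

def sanitize_excel_sheet_name_alt (name : String) : String :=
  if name = "" then "Sheet"
  else
    -- name = "".join("_" if c in _INVALID else c for c in name)   (one pass)
    let cleaned := String.ofList (name.toList.map (fun c => if pvInvalidChars.contains c then '_' else c))
    let s := PySem.Str.stripChars cleaned "'"
    let t := if PySem.Str.len s > 31 then PySem.Str.slice s none (some 31) else s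
    if t = "" then "Sheet" else t

-- ===== PRECONDITION & SPEC =====
def Spec_sanitize_excel_sheet_name (name : String) (out : String) : Prop := out = sanitize_excel_sheet_name_alt name
instance (name : String) (out : String) : Decidable (Spec_sanitize_excel_sheet_name name out) := by unfold Spec_sanitize_excel_sheet_name; infer_instance

-- ===== CLAIM (what is proved, stated in full; the proofs are below) =====
def Claim_equal_sanitize_excel_sheet_name : Prop := ∀ (name : String), Dom_sanitize_excel_sheet_name name → Spec_sanitize_excel_sheet_name name (sanitize_excel_sheet_name name)

-- ===== LEMMAS AND PROOFS =====

-- one unfolding step of replace.go on a cons cell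
theorem pv_go_step (c c' : Char) (n : Nat) (t acc : List Char) :
    PySem.Chars.replace.go [c] ['_'] (n+1) (c'::t) acc
      = if [c].isPrefixOf (c'::t) then PySem.Chars.replace.go [c] ['_'] n (List.drop 1 (c'::t)) ('_'::acc)
        else PySem.Chars.replace.go [c] ['_'] n t (c'::acc) := by
  rw [PySem.Chars.replace.go]
  simp

-- replace.go with a single-char pattern maps that char to '_' in the remaining characters
theorem pv_go_single (c : Char) : ∀ (fuel : Nat) (l acc : List Char), l.length ≤ fuel →
    PySem.Chars.replace.go [c] ['_'] fuel l acc
      = acc.reverse ++ l.map (fun x => if x = c then '_' else x) := by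
  intro fuel
  induction fuel with
  | zero =>
    intro l acc h
    have : l = [] := List.eq_nil_of_length_eq_zero (Nat.le_zero.mp h)
    subst this
    simp [PySem.Chars.replace.go]
  | succ n ih =>
    intro l acc h
    cases l with
    | nil => simp [PySem.Chars.replace.go]
    | cons c' t =>
      have ht : t.length ≤ n := by simpa using Nat.le_of_succ_le_succ h
      rw [pv_go_step]
      by_cases hc : c' = c
      · simp [List.isPrefixOf, hc, ih _ _ ht]
      · have : (c == c') = false := by simp [Ne.symm hc]
        simp [List.isPrefixOf, this, hc, ih _ _ ht]

-- replace with a single-char pattern is a map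
theorem pv_replace_single (s : List Char) (c : Char) :
    PySem.Chars.replace s [c] ['_'] = s.map (fun x => if x = c then '_' else x) := by
  simp only [PySem.Chars.replace, List.isEmpty]
  have := pv_go_single c s.length s [] (le_refl _)
  simpa using this

-- A's seven replace passes produce exactly B's one-pass map
set_option maxHeartbeats 4000000 in
theorem pv_chain (name : String) :
    [":", "\\", "/", "?", "*", "[", "]"].foldl (fun n c => PySem.Str.replace n c "_") name
      = String.ofList (name.toList.map (fun c => if pvInvalidChars.contains c then '_' else c)) := by
  have h : ([":", "\\", "/", "?", "*", "[", "]"].foldl (fun n c => PySem.Str.replace n c "_") name).toList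
      = name.toList.map (fun c => if pvInvalidChars.contains c then '_' else c) := by
    simp only [List.foldl, PySem.Str.toList_replace]
    simp only [show (":" : String).toList = [':'] from rfl,
      show ("\\" : String).toList = ['\\'] from rfl,
      show ("/" : String).toList = ['/'] from rfl,
      show ("?" : String).toList = ['?'] from rfl,
      show ("*" : String).toList = ['*'] from rfl,
      show ("[" : String).toList = ['['] from rfl,
      show ("]" : String).toList = [']'] from rfl,
      show ("_" : String).toList = ['_'] from rfl,
      pv_replace_single, List.map_map]
    apply List.map_congr_left
    intro x hx
    by_cases hmem : x ∈ pvInvalidChars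
    · fin_cases hmem <;> rfl
    · simp only [pvInvalidChars, List.mem_cons, List.not_mem_nil, or_false] at hmem
      push Not at hmem
      obtain ⟨h1, h2, h3, h4, h5, h6, h7⟩ := hmem
      have hc : pvInvalidChars.contains x = false := by
        simp [pvInvalidChars, h1, h2, h3, h4, h5, h6, h7]
      rw [hc]
      simp only [Bool.false_eq_true, if_false, Function.comp_apply,
        if_neg h1, if_neg h2, if_neg h3, if_neg h4, if_neg h5, if_neg h6, if_neg h7]
  exact String.toList_injective (by simpa using h)

-- ===== VERDICT (by name: the statement is the Claim_ definition above) =====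
theorem sanitize_excel_sheet_name_spec : Claim_equal_sanitize_excel_sheet_name := by
  intro name _
  unfold Spec_sanitize_excel_sheet_name sanitize_excel_sheet_name sanitize_excel_sheet_name_alt
  by_cases h : name = ""
  · simp [h]
  · simp only [h, if_false]
    rw [pv_chain]
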